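-- pv_equiv track=rewrite | github.com/runnerup96/EHRSQL-text2sql-solution | utils/data_processing_utils.py | lower_sql
-- ===== SOURCE A (Python) =====
-- def lower_sql(s):
--     in_quotation = False
--     out_s = ""
--     for char in s:
--         if in_quotation:
--             out_s += char
--         else:
--             out_s += char.lower()
--
--         if char == "'":
--             if in_quotation:
--                 in_quotation = False
--             else:
--                 in_quotation = True
--
--     return out_s
-- ===== SOURCE B (Python) =====
-- def lower_sql(s):
--     return "'".join(p.lower() if i % 2 == 0 else p
--                     for i, p in enumerate(s.split("'")))
-- ===== Notes on version B (the rewrite author's own statement) =====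
-- stated objective: idiomatic
-- what changed: Replaces the per-character loop with its in_quotation toggle and string concatenation by splitting on the quote character, lowercasing only the even-indexed (outside-quote) segments, and rejoining with quotes.
import Mathlib
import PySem

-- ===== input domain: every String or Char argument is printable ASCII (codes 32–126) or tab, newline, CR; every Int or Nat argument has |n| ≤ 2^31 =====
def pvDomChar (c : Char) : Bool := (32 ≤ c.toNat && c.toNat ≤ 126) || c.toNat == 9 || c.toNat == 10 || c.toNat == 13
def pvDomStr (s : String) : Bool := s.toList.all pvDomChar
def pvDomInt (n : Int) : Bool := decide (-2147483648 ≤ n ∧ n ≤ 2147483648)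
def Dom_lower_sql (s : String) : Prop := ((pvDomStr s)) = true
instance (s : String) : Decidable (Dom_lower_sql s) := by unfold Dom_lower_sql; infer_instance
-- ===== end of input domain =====

-- B replaces A's per-character loop and quotation toggle by splitting on "'",
-- lowercasing the even-indexed (outside-quote) segments and rejoining (idiomatic).

-- ===== PORT A =====
def lowerSqlStep (st : Bool × List Char) (c : Char) : Bool × List Char :=
  let out := if st.1 then st.2 ++ [c] else st.2 ++ [PySem.Chars.lowerChar c]
  let q := if c = '\'' then (if st.1 then false else true) else st.1
  (q, out)

def lower_sql (s : String) : String :=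
  String.mk ((s.toList.foldl lowerSqlStep (false, [])).2)

-- ===== PORT B =====
def lower_sql_alt (s : String) : String :=
  String.mk (PySem.Chars.join ['\'']
    ((PySem.List.enumerate (PySem.Chars.splitOn s.toList ['\''])).map
      (fun ip => if ip.1 % 2 == 0 then PySem.Chars.lower ip.2 else ip.2)))

-- ===== PRECONDITION & SPEC =====
def Spec_lower_sql (s : String) (out : String) : Prop := out = lower_sql_alt s
instance (s : String) (out : String) : Decidable (Spec_lower_sql s out) := by unfold Spec_lower_sql; infer_instance

-- ===== CLAIM (what is proved, stated in full; the proofs are below) =====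
def Claim_equal_lower_sql : Prop := ∀ (s : String), Dom_lower_sql s → Spec_lower_sql s (lower_sql s)

-- ===== LEMMAS AND PROOFS =====

-- reference splitting on a single quote
def natSplitQ : List Char → List (List Char)
  | [] => [[]]
  | c :: cs => if c = '\'' then [] :: natSplitQ cs else (natSplitQ cs).modifyHead (c :: ·)

theorem natSplitQ_cons_shape (cs : List Char) : ∃ p ps, natSplitQ cs = p :: ps := by
  induction cs with
  | nil => exact ⟨[], [], rfl⟩
  | cons c cs ih =>
    obtain ⟨p, ps, h⟩ := ih
    by_cases hc : c = '\''
    · exact ⟨[], natSplitQ cs, by simp [natSplitQ, hc]⟩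
    · exact ⟨c :: p, ps, by simp [natSplitQ, hc, h]⟩

theorem splitOn_go_eq (fuel : Nat) : ∀ (l cur : List Char) (acc : List (List Char)),
    l.length < fuel →
    PySem.Chars.splitOn.go ['\''] fuel l cur acc =
      acc.reverse ++ (natSplitQ l).modifyHead (cur.reverse ++ ·) := by
  induction fuel with
  | zero => intro l cur acc h; omega
  | succ fuel ih =>
    intro l cur acc h
    cases l with
    | nil => simp [PySem.Chars.splitOn.go, natSplitQ]
    | cons c rest =>
      by_cases hc : c = '\''
      · have h1 : List.isPrefixOf ['\''] (c :: rest) = true := by simp [List.isPrefixOf, hc]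
        rw [PySem.Chars.splitOn.go, if_pos h1]
        rw [ih _ _ _ (by simp at h ⊢; omega)]
        obtain ⟨p, ps, hps⟩ := natSplitQ_cons_shape rest
        simp [natSplitQ, hc, hps]
      · have h1 : List.isPrefixOf ['\''] (c :: rest) = false := by
          simp [List.isPrefixOf]; exact fun hh => hc hh.symm
        rw [PySem.Chars.splitOn.go, if_neg (by simp [h1])]
        rw [ih _ _ _ (by simp at h ⊢; omega)]
        obtain ⟨p, ps, hps⟩ := natSplitQ_cons_shape rest
        simp [natSplitQ, hc, hps]

theorem splitOn_eq (cs : List Char) : PySem.Chars.splitOn cs ['\''] = natSplitQ cs := by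
  rw [PySem.Chars.splitOn, splitOn_go_eq _ _ _ _ (by omega)]
  obtain ⟨p, ps, hps⟩ := natSplitQ_cons_shape cs
  simp [hps]

-- reference recursion for A's loop
def fRec : Bool → List Char → List Char
  | _, [] => []
  | q, c :: cs => (if q then c else PySem.Chars.lowerChar c) :: fRec (if c = '\'' then !q else q) cs

theorem foldl_fRec (cs : List Char) : ∀ (q : Bool) (acc : List Char),
    (cs.foldl lowerSqlStep (q, acc)).2 = acc ++ fRec q cs := by
  induction cs with
  | nil => intro q acc; simp [fRec]
  | cons c cs ih =>
    intro q acc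
    by_cases hc : c = '\'' <;> cases q <;>
      simp [lowerSqlStep, hc, fRec, ih]

-- alternate lowering of segments
def gAlt : Bool → List (List Char) → List (List Char)
  | _, [] => []
  | q, p :: ps => (if q then p else PySem.Chars.lower p) :: gAlt (!q) ps

theorem enumerate_map_gAlt (parts : List (List Char)) : ∀ (k : Int) (q : Bool),
    ((k % 2 == 0) = !q) →
    (PySem.List.enumerate parts k).map
      (fun ip => if ip.1 % 2 == 0 then PySem.Chars.lower ip.2 else ip.2) = gAlt q parts := by
  induction parts with
  | nil => intro k q _; simp [PySem.List.enumerate_nil, gAlt]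
  | cons p ps ih =>
    intro k q hk
    have hk' : ((k + 1) % 2 == 0) = !(!q) := by
      cases q <;> simp_all <;> omega
    rw [PySem.List.enumerate_cons, List.map_cons, ih (k + 1) (!q) hk', gAlt]
    cases q <;> simp_all

theorem fRec_join (cs : List Char) : ∀ (q : Bool),
    fRec q cs = PySem.Chars.join ['\''] (gAlt q (natSplitQ cs)) := by
  induction cs with
  | nil =>
    intro q
    cases q <;>
      simp [fRec, natSplitQ, gAlt, PySem.Chars.lower, PySem.Chars.join_singleton]
  | cons c cs ih =>
    intro q
    obtain ⟨p, ps, hps⟩ := natSplitQ_cons_shape cs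
    by_cases hc : c = '\''
    · subst hc
      have h1 : fRec q ('\'' :: cs) = '\'' :: fRec (!q) cs := by
        cases q <;> simp [fRec, show PySem.Chars.lowerChar '\'' = '\'' from by decide]
      have h2 : natSplitQ ('\'' :: cs) = [] :: natSplitQ cs := by simp [natSplitQ]
      rw [h1, ih (!q), h2, hps]
      cases q <;>
        simp [gAlt, PySem.Chars.lower, PySem.Chars.join_cons_cons]
    · have h1 : fRec q (c :: cs) = (if q then c else PySem.Chars.lowerChar c) :: fRec q cs := by
        simp [fRec, hc]
      have h2 : natSplitQ (c :: cs) = (c :: p) :: ps := by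
        simp [natSplitQ, hc, hps]
      rw [h1, ih q, h2, hps]
      cases ps with
      | nil =>
        cases q <;>
          simp [gAlt, PySem.Chars.lower, PySem.Chars.join_singleton]
      | cons r rs =>
        cases q <;>
          simp [gAlt, PySem.Chars.lower, PySem.Chars.join_cons_cons]

-- ===== VERDICT (by name: the statement is the Claim_ definition above) =====
theorem lower_sql_spec : Claim_equal_lower_sql := by
  intro s _
  unfold Spec_lower_sql lower_sql lower_sql_alt
  rw [splitOn_eq, enumerate_map_gAlt _ 0 false (by decide), foldl_fRec, ← fRec_join]
  rfl
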